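-- pv_equiv track=rewrite | github.com/Chenalong/TestPartition | src_py/CalCommunication.py | __cal_communication
-- ===== SOURCE A (Python) =====
-- def __cal_communication(relation_dict, partition_num, map_dict):
--     """
--     :param relation_dict: 保存用户/物品 与 物品/用户的相关关系
--     :param partition_num: 物品和用户的分区数量
--     :param map_dict:  物品和用户id 对应的分区号
--     :return: 计算 用户/物品特征向量需要的网络传输量
--     """
--     communication_total = 0
--     partition_related_vectors = []
--     for i in range(partition_num):
--         partition_related_vectors.append(set())
--
--     for key in relation_dict:
--         partition = map_dict[key]
--         for value in relation_dict[key]: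
--             partition_related_vectors[partition].add(value)
--
--     for i in range(partition_num):
--         communication_total += len(partition_related_vectors[i])
--
--     return communication_total
-- ===== SOURCE B (Python) =====
-- def __cal_communication(relation_dict, partition_num, map_dict):
--     """
--     :param relation_dict: 保存用户/物品 与 物品/用户的相关关系
--     :param partition_num: 物品和用户的分区数量
--     :param map_dict:  物品和用户id 对应的分区号
--     :return: 计算 用户/物品特征向量需要的网络传输量
--     """
--     pairs = []
--     for key in relation_dict:
--         partition = map_dict[key]
--         for value in relation_dict[key]:
--             pairs.append((partition, value))
--     pairs.sort()
--     total = 0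
--     prev = None
--     for p in pairs:
--         if p != prev:
--             total += 1
--         prev = p
--     return total
-- ===== Notes on version B (the rewrite author's own statement) =====
-- stated objective: alternative
-- what changed: B replaces A's preallocated list of per-partition hash sets, the index-based scatter into it and the trailing summation loop by a sort-based distinct count: it collects the flat (partition, value) pair list, sorts it, and counts entries that differ from their predecessor in one scan.
-- outside the precondition, e.g. on __cal_communication({1: [5], 2: [5]}, 2, {1: 1, 2: -1}): A returns 1, B returns 2
import Mathlib
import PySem

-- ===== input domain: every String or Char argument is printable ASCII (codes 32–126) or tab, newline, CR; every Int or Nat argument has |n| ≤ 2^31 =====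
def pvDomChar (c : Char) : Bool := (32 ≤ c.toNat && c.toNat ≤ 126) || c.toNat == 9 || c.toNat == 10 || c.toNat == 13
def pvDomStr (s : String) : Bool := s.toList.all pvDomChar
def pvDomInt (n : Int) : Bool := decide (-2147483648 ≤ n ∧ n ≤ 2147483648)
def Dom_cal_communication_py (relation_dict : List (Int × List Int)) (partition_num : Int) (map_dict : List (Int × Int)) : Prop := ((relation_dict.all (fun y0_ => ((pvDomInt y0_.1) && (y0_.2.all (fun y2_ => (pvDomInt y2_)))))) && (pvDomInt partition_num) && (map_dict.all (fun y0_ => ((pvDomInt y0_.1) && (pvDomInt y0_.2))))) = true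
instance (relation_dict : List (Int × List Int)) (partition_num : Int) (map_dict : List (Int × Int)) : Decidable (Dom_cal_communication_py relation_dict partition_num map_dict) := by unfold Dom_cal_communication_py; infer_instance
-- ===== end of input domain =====

-- B replaces A's scatter into per-partition sets plus trailing summation by a sort-based distinct
-- count of the flat (partition, value) pairs (objective: alternative algorithm, not faster).

-- ===== PORT A =====
def cal_communication_py (relation_dict : List (Int × List Int)) (partition_num : Int) (map_dict : List (Int × Int)) : Int :=
  -- partition_related_vectors = []; for i in range(partition_num): append(set())
  let prv0 : List (PySem.Set Int) :=
    (PySem.List.pyRange 0 partition_num 1).foldl (fun l _ => l ++ [(PySem.Set.empty : PySem.Set Int)]) []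
  -- for key in relation_dict: partition = map_dict[key]; for value in relation_dict[key]: prv[partition].add(value)
  let prv := relation_dict.foldl (fun prv kv =>
      let partition := (PySem.Dict.get? (PySem.Dict.mk map_dict) kv.1).getD 0
      kv.2.foldl (fun prv value =>
          PySem.List.pySetD prv partition
            (PySem.Set.add (PySem.List.pyGetD prv partition PySem.Set.empty) value)) prv) prv0
  -- for i in range(partition_num): communication_total += len(prv[i])
  (PySem.List.pyRange 0 partition_num 1).foldl
    (fun acc i => acc + PySem.Set.len (PySem.List.pyGetD prv i PySem.Set.empty)) 0

-- ===== PORT B =====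
def cal_communication_py_alt (relation_dict : List (Int × List Int)) (partition_num : Int) (map_dict : List (Int × Int)) : Int :=
  -- pairs = []; for key: partition = map_dict[key]; for value: pairs.append((partition, value))
  let pairs := relation_dict.foldl (fun acc kv =>
      let partition := (PySem.Dict.get? (PySem.Dict.mk map_dict) kv.1).getD 0
      kv.2.foldl (fun acc value => acc ++ [(partition, value)]) acc) []
  -- pairs.sort()  (tuples of ints: lexicographic)
  let sortedPairs := PySem.List.sorted2 pairs Prod.fst Prod.snd
  -- total = 0; prev = None; for p in sortedPairs: (if p != prev: total += 1); prev = p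
  (sortedPairs.foldl
    (fun st p => (if some p ≠ st.2 then st.1 + 1 else st.1, some p))
    ((0 : Int), (none : Option (Int × Int)))).1

-- ===== PRECONDITION & SPEC =====
-- Pre_ excludes: relation keys missing from map_dict (A raises KeyError); partition ids outside
-- [0, partition_num) paired with a non-empty value list (A raises IndexError below -partition_num,
-- and on a negative in-wrap id A's value comes from accidental negative-index wraparound that
-- silently merges partitions).
def Pre_cal_communication_py (relation_dict : List (Int × List Int)) (partition_num : Int) (map_dict : List (Int × Int)) : Prop :=
  ∀ kv ∈ relation_dict,
    (PySem.Dict.contains (PySem.Dict.mk map_dict) kv.1 = true) ∧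
    (kv.2 ≠ [] →
      0 ≤ (PySem.Dict.get? (PySem.Dict.mk map_dict) kv.1).getD 0 ∧
      (PySem.Dict.get? (PySem.Dict.mk map_dict) kv.1).getD 0 < partition_num)
instance (relation_dict : List (Int × List Int)) (partition_num : Int) (map_dict : List (Int × Int)) : Decidable (Pre_cal_communication_py relation_dict partition_num map_dict) := by unfold Pre_cal_communication_py; infer_instance

def pvWitness_cal_communication_py : (List (Int × List Int)) × Int × (List (Int × Int)) :=
  ([(1, [2, 3]), (2, [3])], 2, [(1, 0), (2, 1)])

def Spec_cal_communication_py (relation_dict : List (Int × List Int)) (partition_num : Int) (map_dict : List (Int × Int)) (out : Int) : Prop := out = cal_communication_py_alt relation_dict partition_num map_dict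
instance (relation_dict : List (Int × List Int)) (partition_num : Int) (map_dict : List (Int × Int)) (out : Int) : Decidable (Spec_cal_communication_py relation_dict partition_num map_dict out) := by unfold Spec_cal_communication_py; infer_instance

-- ===== CLAIM (what is proved, stated in full; the proofs are below) =====
def Claim_equal_cal_communication_py : Prop := ∀ (relation_dict : List (Int × List Int)) (partition_num : Int) (map_dict : List (Int × Int)), Dom_cal_communication_py relation_dict partition_num map_dict → Pre_cal_communication_py relation_dict partition_num map_dict → Spec_cal_communication_py relation_dict partition_num map_dict (cal_communication_py relation_dict partition_num map_dict)

-- ===== LEMMAS AND PROOFS =====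

-- ---------- A-side: A's result is the size of the set of distinct (partition, value) pairs ----------

-- total size of the per-partition sets, as A sums it
def pvG (prv : List (PySem.Set Int)) : Int := (prv.map PySem.Set.len).sum

-- invariant tying A's scatter state to the flat pair set
def pvInv (L : Nat) (prv : List (PySem.Set Int)) (P : PySem.Set (Int × Int)) : Prop :=
  prv.length = L ∧
  (∀ q w, (q, w) ∈ P ↔ ∃ n : Nat, ∃ _ : n < prv.length, q = (n : Int) ∧ w ∈ prv[n]) ∧
  pvG prv = (P.length : Int)

lemma pv_sum_map_set {α : Type} (f : α → Int) (xs : List α) (n : Nat) (y : α) (h : n < xs.length) :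
    ((xs.set n y).map f).sum = (xs.map f).sum - f xs[n] + f y := by
  induction xs generalizing n with
  | nil => simp at h
  | cons a as ih =>
    cases n with
    | zero => simp; ring
    | succ m =>
      simp only [List.set, List.map_cons, List.sum_cons, List.getElem_cons_succ]
      rw [ih m (by simpa using h)]
      ring

lemma pv_step (L : Nat) (prv : List (PySem.Set Int)) (P : PySem.Set (Int × Int)) (p v : Int)
    (hInv : pvInv L prv P) (h0 : 0 ≤ p) (hL : p < (L : Int)) :
    pvInv L (PySem.List.pySetD prv p (PySem.Set.add (PySem.List.pyGetD prv p PySem.Set.empty) v))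
            (PySem.Set.add P (p, v)) := by
  obtain ⟨hlen, hmem, hsum⟩ := hInv
  have hn : p.toNat < prv.length := by omega
  have hgetd : PySem.List.pyGetD prv p PySem.Set.empty = prv[p.toNat] := by
    simp [PySem.List.pyGetD, PySem.List.pyGet?_of_nonneg prv h0, List.getElem?_eq_getElem hn]
  have hp : p = ((p.toNat : Nat) : Int) := by omega
  rw [PySem.List.pySetD_of_nonneg prv _ h0, hgetd]
  have hinP : ((p, v) ∈ P) ↔ v ∈ prv[p.toNat] := by
    rw [hmem p v]
    constructor
    · rintro ⟨m, hm, hq, hw⟩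
      have : m = p.toNat := by omega
      subst this; exact hw
    · intro hw; exact ⟨p.toNat, hn, hp, hw⟩
  refine ⟨by simpa using hlen, ?_, ?_⟩
  · intro q w
    rw [PySem.Set.mem_add]
    constructor
    · rintro (hqw | hqw)
      · obtain ⟨m, hm, hq, hw⟩ := (hmem q w).1 hqw
        refine ⟨m, by simpa using hm, hq, ?_⟩
        rw [List.getElem_set]
        split
        · next he => rw [PySem.Set.mem_add]; exact Or.inl (he ▸ hw)
        · exact hw
      · have hq : q = p := congrArg Prod.fst hqw
        have hw : w = v := congrArg Prod.snd hqw
        refine ⟨p.toNat, by simpa using hn, by omega, ?_⟩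
        rw [List.getElem_set]
        simp [PySem.Set.mem_add, hw]
    · rintro ⟨m, hm, hq, hw⟩
      have hm' : m < prv.length := by simpa using hm
      rw [List.getElem_set] at hw
      by_cases he : p.toNat = m
      · rw [if_pos he] at hw
        rcases (PySem.Set.mem_add _ _ _).1 hw with hw | hw
        · exact Or.inl ((hmem q w).2 ⟨m, hm', hq, he ▸ hw⟩)
        · refine Or.inr ?_
          rw [hq, hw, ← he, ← hp]
      · rw [if_neg he] at hw
        exact Or.inl ((hmem q w).2 ⟨m, hm', hq, hw⟩)
  · unfold pvG at hsum ⊢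
    rw [pv_sum_map_set PySem.Set.len prv p.toNat _ hn, PySem.Set.add_eq_ite, PySem.Set.add_eq_ite]
    by_cases hv : v ∈ prv[p.toNat]
    · rw [if_pos hv, if_pos (hinP.2 hv), hsum]; ring
    · rw [if_neg hv, if_neg (fun h => hv (hinP.1 h))]
      simp only [PySem.Set.len, List.length_append, List.length_cons, List.length_nil] at hsum ⊢
      push_cast
      omega

lemma pv_inner (L : Nat) (vals : List Int) (p : Int)
    (prv : List (PySem.Set Int)) (P : PySem.Set (Int × Int))
    (h0 : 0 ≤ p) (hL : p < (L : Int)) (hInv : pvInv L prv P) :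
    pvInv L
      (vals.foldl (fun prv value =>
          PySem.List.pySetD prv p
            (PySem.Set.add (PySem.List.pyGetD prv p PySem.Set.empty) value)) prv)
      (vals.foldl (fun s v => PySem.Set.add s (p, v)) P) := by
  induction vals generalizing prv P with
  | nil => exact hInv
  | cons v vs ih =>
    rw [List.foldl_cons, List.foldl_cons]
    exact ih _ _ (pv_step L prv P p v hInv h0 hL)

lemma pv_outer (rel : List (Int × List Int)) (N : Int) (md : List (Int × Int)) (L : Nat)
    (hNL : N ≤ (L : Int))
    (prv : List (PySem.Set Int)) (P : PySem.Set (Int × Int))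
    (hpre : ∀ kv ∈ rel, kv.2 ≠ [] →
      0 ≤ (PySem.Dict.get? (PySem.Dict.mk md) kv.1).getD 0 ∧
      (PySem.Dict.get? (PySem.Dict.mk md) kv.1).getD 0 < N)
    (hInv : pvInv L prv P) :
    pvInv L
      (rel.foldl (fun prv kv =>
          kv.2.foldl (fun prv value =>
              PySem.List.pySetD prv ((PySem.Dict.get? (PySem.Dict.mk md) kv.1).getD 0)
                (PySem.Set.add
                  (PySem.List.pyGetD prv ((PySem.Dict.get? (PySem.Dict.mk md) kv.1).getD 0)
                    PySem.Set.empty) value)) prv) prv)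
      (rel.foldl (fun s kv =>
          kv.2.foldl (fun s v =>
              PySem.Set.add s ((PySem.Dict.get? (PySem.Dict.mk md) kv.1).getD 0, v)) s) P) := by
  induction rel generalizing prv P with
  | nil => exact hInv
  | cons kv rest ih =>
    rw [List.foldl_cons, List.foldl_cons]
    have hrest := fun kv' h' => hpre kv' (List.mem_cons_of_mem _ h')
    have hnext : pvInv L
        (kv.2.foldl (fun prv value =>
            PySem.List.pySetD prv ((PySem.Dict.get? (PySem.Dict.mk md) kv.1).getD 0)
              (PySem.Set.add
                (PySem.List.pyGetD prv ((PySem.Dict.get? (PySem.Dict.mk md) kv.1).getD 0)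
                  PySem.Set.empty) value)) prv)
        (kv.2.foldl (fun s v =>
            PySem.Set.add s ((PySem.Dict.get? (PySem.Dict.mk md) kv.1).getD 0, v)) P) := by
      cases hv : kv.2 with
      | nil => exact hInv
      | cons v vs =>
        obtain ⟨hp0, hpN⟩ := hpre kv (List.mem_cons_self ..) (by simp [hv])
        exact pv_inner L (v :: vs) _ prv P hp0 (lt_of_lt_of_le hpN hNL) hInv
    exact ih _ _ hrest hnext

lemma pv_range_eq (N : Int) :
    PySem.List.pyRange 0 N 1 = (List.range N.toNat).map (fun n : Nat => ((n : Nat) : Int)) := by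
  have h : (if 0 < N then N.toNat else 0) = N.toNat := by split <;> omega
  simp [PySem.List.pyRange, h, List.map_eq_flatMap]

lemma pv_init (N : Int) :
    pvInv N.toNat
      ((PySem.List.pyRange 0 N 1).foldl (fun l _ => l ++ [(PySem.Set.empty : PySem.Set Int)]) [])
      PySem.Set.empty := by
  rw [PySem.List.foldl_append_singleton_eq_map]
  refine ⟨by simp [pv_range_eq], ?_, ?_⟩
  · intro q w
    simp [PySem.Set.empty]
  · simp [pvG, PySem.Set.empty, PySem.Set.len]

lemma pv_map_range_getD (xs : List (PySem.Set Int)) :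
    (List.range xs.length).map (fun n => PySem.Set.len (xs.getD n PySem.Set.empty)) = xs.map PySem.Set.len := by
  induction xs with
  | nil => simp
  | cons a as ih =>
    rw [List.length_cons, List.range_succ_eq_map, List.map_cons, List.map_map, List.map_cons]
    refine congrArg₂ _ rfl ?_
    rw [← ih]
    rfl

lemma pv_final (N : Int) (prv : List (PySem.Set Int)) (P : PySem.Set (Int × Int))
    (hlen : prv.length = N.toNat) (hsum : pvG prv = (P.length : Int)) :
    (PySem.List.pyRange 0 N 1).foldl
      (fun acc i => acc + PySem.Set.len (PySem.List.pyGetD prv i PySem.Set.empty)) 0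
    = (P.length : Int) := by
  rw [PySem.List.foldl_add, pv_range_eq N, ← hlen, List.map_map]
  have h2 : ((List.range prv.length).map
        ((fun i => PySem.Set.len (PySem.List.pyGetD prv i PySem.Set.empty)) ∘
          (fun n : Nat => ((n : Nat) : Int))))
      = prv.map PySem.Set.len := by
    rw [← pv_map_range_getD prv]
    refine List.map_congr_left (fun n hn => ?_)
    simp [Function.comp, PySem.List.pyGetD_natCast]
  rw [h2]
  show 0 + pvG prv = (P.length : Int)
  rw [hsum]
  ring

-- ---------- B-side: sort then count adjacent-distinct = number of distinct elements ----------

-- Python's tuple '<' on pairs of ints, as sorted2 compares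
def pvLt (a b : Int × Int) : Bool :=
  decide (a.1 < b.1) || (!decide (b.1 < a.1) && decide (a.2 < b.2))

-- the corresponding non-strict (lexicographic) order
def pvR (a b : Int × Int) : Prop := pvLt b a = false

lemma pvR_iff (a b : Int × Int) : pvR a b ↔ (a.1 < b.1 ∨ (a.1 = b.1 ∧ a.2 ≤ b.2)) := by
  simp only [pvR, pvLt, Bool.or_eq_false_iff, Bool.and_eq_false_iff, Bool.not_eq_false',
    decide_eq_false_iff_not, decide_eq_true_eq, not_lt]
  omega

lemma pvR_trans {a b c : Int × Int} (h1 : pvR a b) (h2 : pvR b c) : pvR a c := by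
  rw [pvR_iff] at h1 h2 ⊢; omega

lemma pvR_antisymm {a b : Int × Int} (h1 : pvR a b) (h2 : pvR b a) : a = b := by
  rw [pvR_iff] at h1 h2
  have e1 : a.1 = b.1 := by omega
  have e2 : a.2 = b.2 := by omega
  exact Prod.ext e1 e2

lemma pvLt_false_of_true {a b : Int × Int} (h : pvLt a b = true) : pvR a b := by
  simp only [pvLt, Bool.or_eq_true, Bool.and_eq_true, Bool.not_eq_true',
    decide_eq_true_eq, decide_eq_false_iff_not, not_lt] at h
  rw [pvR_iff]; omega

lemma pv_insertBy_pairwise (x : Int × Int) (l : List (Int × Int)) (h : l.Pairwise pvR) :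
    (PySem.List.insertBy pvLt x l).Pairwise pvR := by
  induction l with
  | nil => simp [PySem.List.insertBy]
  | cons y ys ih =>
    rw [PySem.List.insertBy]
    rcases List.pairwise_cons.1 h with ⟨hy, hys⟩
    by_cases hlt : pvLt x y = true
    · rw [if_pos hlt]
      refine List.pairwise_cons.2 ⟨?_, h⟩
      intro z hz
      rcases List.mem_cons.1 hz with hz | hz
      · exact hz ▸ pvLt_false_of_true hlt
      · exact pvR_trans (pvLt_false_of_true hlt) (hy z hz)
    · rw [if_neg hlt]
      refine List.pairwise_cons.2 ⟨?_, ih hys⟩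
      intro z hz
      rcases (PySem.List.mem_insertBy pvLt x z ys).1 hz with hz | hz
      · subst hz
        exact Bool.eq_false_iff.2 hlt
      · exact hy z hz

lemma pv_sorted2_pairwise (l : List (Int × Int)) :
    (PySem.List.sorted2 l Prod.fst Prod.snd).Pairwise pvR := by
  show (l.foldl (fun acc x => PySem.List.insertBy pvLt x acc) []).Pairwise pvR
  have : ∀ (acc : List (Int × Int)), acc.Pairwise pvR →
      (l.foldl (fun acc x => PySem.List.insertBy pvLt x acc) acc).Pairwise pvR := by
    induction l with
    | nil => intro acc h; exact h
    | cons a as ih =>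
      intro acc h
      rw [List.foldl_cons]
      exact ih _ (pv_insertBy_pairwise a acc h)
  exact this [] (List.Pairwise.nil)

-- the scan's counting, in recursive form
def pvCount : List (Int × Int) → Option (Int × Int) → Int
  | [], _ => 0
  | p :: rest, prev => (if some p ≠ prev then 1 else 0) + pvCount rest (some p)

lemma pv_foldl_count (l : List (Int × Int)) (t : Int) (prev : Option (Int × Int)) :
    (l.foldl (fun st p => (if some p ≠ st.2 then st.1 + 1 else st.1, some p)) (t, prev)).1
      = t + pvCount l prev := by
  induction l generalizing t prev with
  | nil => simp [pvCount]
  | cons p rest ih =>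
    rw [List.foldl_cons, pvCount]
    by_cases h : some p ≠ prev
    · rw [if_pos h]
      show (rest.foldl _ (t + 1, some p)).1 = _
      rw [ih]; rw [if_pos h]; ring
    · rw [if_neg h]
      show (rest.foldl _ (t, some p)).1 = _
      rw [ih]; rw [if_neg h]; ring

lemma pv_nodup_filter_len {l : List (Int × Int)} (x : Int × Int)
    (hnd : l.Nodup) (hx : x ∈ l) :
    (l.length : Int) = ((l.filter (fun y => y ≠ x)).length : Int) + 1 := by
  have hperm : l.Perm (x :: l.erase x) := List.perm_cons_erase hx
  have hlen : l.length = (l.erase x).length + 1 := by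
    simpa using hperm.length_eq
  have hfe : l.filter (fun y => y ≠ x) = l.erase x := by
    rw [hnd.erase_eq_filter x]
    refine List.filter_congr (fun y hy => ?_)
    by_cases h : y = x <;> simp [h]
  rw [hfe]
  omega

lemma pv_count_some (l : List (Int × Int)) (x : Int × Int)
    (hp : l.Pairwise pvR) (hx : ∀ y ∈ l, pvR x y) :
    pvCount l (some x) = (((l.dedup.filter (fun y => y ≠ x)).length : Nat) : Int) := by
  induction l generalizing x with
  | nil => simp [pvCount]
  | cons y ys ih =>
    rcases List.pairwise_cons.1 hp with ⟨hy, hys⟩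
    by_cases hxy : y = x
    · subst hxy
      rw [pvCount, if_neg (by simp)]
      have hfilter : (y :: ys).dedup.filter (fun z => z ≠ y) = ys.dedup.filter (fun z => z ≠ y) := by
        by_cases hmem : y ∈ ys
        · rw [List.dedup_cons_of_mem hmem]
        · rw [List.dedup_cons_of_notMem hmem, List.filter_cons_of_neg (by simp)]
      rw [hfilter, ih y hys hy]
      ring
    · rw [pvCount, if_pos (by simpa using hxy)]
      have hxys : x ∉ y :: ys := by
        intro hmem
        rcases List.mem_cons.1 hmem with h | h
        · exact hxy h.symm
        · exact hxy (pvR_antisymm (hy x h) (hx y (List.mem_cons_self ..)))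
      have hfid : (y :: ys).dedup.filter (fun z => z ≠ x) = (y :: ys).dedup := by
        refine List.filter_eq_self.2 (fun z hz => ?_)
        have : z ∈ y :: ys := List.mem_dedup.1 hz
        simp only [ne_eq, decide_eq_true_eq]
        intro he; exact hxys (he ▸ this)
      rw [hfid, ih y hys hy]
      by_cases hmem : y ∈ ys
      · rw [List.dedup_cons_of_mem hmem]
        have := pv_nodup_filter_len y (List.nodup_dedup ys) (List.mem_dedup.2 hmem)
        omega
      · rw [List.dedup_cons_of_notMem hmem]
        have hfil : ys.dedup.filter (fun z => z ≠ y) = ys.dedup := by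
          refine List.filter_eq_self.2 (fun z hz => ?_)
          have : z ∈ ys := List.mem_dedup.1 hz
          simp only [ne_eq, decide_eq_true_eq]
          intro he; exact hmem (he ▸ this)
        rw [hfil, List.length_cons]
        push_cast
        ring

lemma pv_count_none (l : List (Int × Int)) (hp : l.Pairwise pvR) :
    pvCount l none = ((l.dedup.length : Nat) : Int) := by
  cases l with
  | nil => simp [pvCount]
  | cons x xs =>
    rcases List.pairwise_cons.1 hp with ⟨hx, hxs⟩
    rw [pvCount, if_pos (by simp), pv_count_some xs x hxs hx]
    by_cases hmem : x ∈ xs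
    · rw [List.dedup_cons_of_mem hmem]
      have := pv_nodup_filter_len x (List.nodup_dedup xs) (List.mem_dedup.2 hmem)
      omega
    · rw [List.dedup_cons_of_notMem hmem]
      have hfil : xs.dedup.filter (fun z => z ≠ x) = xs.dedup := by
        refine List.filter_eq_self.2 (fun z hz => ?_)
        have : z ∈ xs := List.mem_dedup.1 hz
        simp only [ne_eq, decide_eq_true_eq]
        intro he; exact hmem (he ▸ this)
      rw [hfil, List.length_cons]
      push_cast
      ring

-- ---------- gluing: both sides count the distinct (partition, value) pairs ----------

lemma pv_foldl_add_flatMap {α : Type} (g : α → List (Int × Int)) (l : List α)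
    (s : PySem.Set (Int × Int)) :
    l.foldl (fun s kv => (g kv).foldl PySem.Set.add s) s
      = (l.flatMap g).foldl PySem.Set.add s := by
  induction l generalizing s with
  | nil => simp
  | cons a as ih =>
    rw [List.foldl_cons, List.flatMap_cons, List.foldl_append]
    exact ih _

-- the flat pair list both programs traverse
def pvPairs (rel : List (Int × List Int)) (md : List (Int × Int)) : List (Int × Int) :=
  rel.flatMap (fun kv => kv.2.map (fun v => ((PySem.Dict.get? (PySem.Dict.mk md) kv.1).getD 0, v)))

lemma pv_set_eq_ofList (rel : List (Int × List Int)) (md : List (Int × Int)) :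
    rel.foldl (fun s kv =>
        kv.2.foldl (fun s v =>
            PySem.Set.add s ((PySem.Dict.get? (PySem.Dict.mk md) kv.1).getD 0, v)) s)
      PySem.Set.empty
    = PySem.Set.ofList (pvPairs rel md) := by
  rw [PySem.Set.ofList_eq_foldl, pvPairs, ← pv_foldl_add_flatMap]
  show _ = rel.foldl (fun s kv =>
      (kv.2.map (fun v => ((PySem.Dict.get? (PySem.Dict.mk md) kv.1).getD 0, v))).foldl
        PySem.Set.add s) PySem.Set.empty
  refine PySem.List.foldl_congr_mem _ _ _ _ (fun s kv _ => ?_)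
  rw [List.foldl_map]

lemma pv_pairs_build (rel : List (Int × List Int)) (md : List (Int × Int)) :
    rel.foldl (fun acc kv =>
        kv.2.foldl (fun acc v =>
            acc ++ [((PySem.Dict.get? (PySem.Dict.mk md) kv.1).getD 0, v)]) acc) []
    = pvPairs rel md := by
  have h : ∀ acc, rel.foldl (fun acc kv =>
        kv.2.foldl (fun acc v =>
            acc ++ [((PySem.Dict.get? (PySem.Dict.mk md) kv.1).getD 0, v)]) acc) acc
      = acc ++ pvPairs rel md := by
    intro acc
    rw [pvPairs, ← PySem.List.foldl_append_eq_flatMap]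
    refine PySem.List.foldl_congr_mem _ _ _ _ (fun acc kv _ => ?_)
    rw [PySem.List.foldl_append_singleton_eq_map]
  simpa using h []

lemma pv_ofList_length_eq_dedup (l : List (Int × Int)) :
    (PySem.Set.ofList l).length = l.dedup.length := by
  refine List.Perm.length_eq ?_
  refine (List.perm_ext_iff_of_nodup (PySem.Set.nodup_ofList l) (List.nodup_dedup l)).2 ?_
  intro a
  rw [PySem.Set.mem_ofList, List.mem_dedup]

-- ===== VERDICT (by name: the statement is the Claim_ definition above) =====
theorem cal_communication_py_spec : Claim_equal_cal_communication_py := by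
  intro rel N md _hDom hkv
  -- A's value = size of the set of distinct pairs
  have hInv := pv_outer rel N md N.toNat (Int.self_le_toNat N) _ PySem.Set.empty
    (fun kv h hne => (hkv kv h).2 hne) (pv_init N)
  have hA : cal_communication_py rel N md
      = (((PySem.Set.ofList (pvPairs rel md)).length : Nat) : Int) := by
    have := pv_final N _ _ hInv.1 hInv.2.2
    rw [cal_communication_py]
    rw [this, pv_set_eq_ofList]
  -- B's value = adjacent-distinct count of the sorted pair list = |dedup|
  have hB : cal_communication_py_alt rel N md
      = (((pvPairs rel md).dedup.length : Nat) : Int) := by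
    rw [cal_communication_py_alt]
    rw [pv_pairs_build]
    rw [pv_foldl_count, pv_count_none _ (pv_sorted2_pairwise (pvPairs rel md))]
    have hperm : (PySem.List.sorted2 (pvPairs rel md) Prod.fst Prod.snd).dedup.Perm
        (pvPairs rel md).dedup :=
      (PySem.List.sorted2_perm (pvPairs rel md) Prod.fst Prod.snd false).dedup
    rw [hperm.length_eq]
    ring
  show cal_communication_py rel N md = cal_communication_py_alt rel N md
  rw [hA, hB, pv_ofList_length_eq_dedup]
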